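-- pv_equiv track=rewrite | github.com/puyanguvic/Argis | src/my_agent_app/tools/email.py | classify_attachment
-- ===== SOURCE A (Python) =====
-- def classify_attachment(filename: str) -> str:
--     lower = (filename or "").lower().strip()
--     if not lower:
--         return "unknown"
--     risky = (
--         ".exe",
--         ".msi",
--         ".bat",
--         ".cmd",
--         ".scr",
--         ".js",
--         ".vbs",
--         ".jar",
--         ".ps1",
--         ".hta",
--         ".iso",
--         ".zip",
--         ".rar",
--     )
--     if any(lower.endswith(ext) for ext in risky):
--         return "high_risk"
--     if lower.endswith((".docm", ".xlsm", ".pptm")):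
--         return "macro_risk"
--     return "low_risk"
-- ===== SOURCE B (Python) =====
-- _RISK = {
--     ".exe": "high_risk", ".msi": "high_risk", ".bat": "high_risk",
--     ".cmd": "high_risk", ".scr": "high_risk", ".js": "high_risk",
--     ".vbs": "high_risk", ".jar": "high_risk", ".ps1": "high_risk",
--     ".hta": "high_risk", ".iso": "high_risk", ".zip": "high_risk",
--     ".rar": "high_risk",
--     ".docm": "macro_risk", ".xlsm": "macro_risk", ".pptm": "macro_risk",
-- }
--
--
-- def classify_attachment(filename: str) -> str:
--     lower = (filename or "").lower().strip()
--     if not lower: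
--         return "unknown"
--     if "." in lower:
--         ext = "." + lower.rsplit(".", 1)[-1]
--     else:
--         ext = ""
--     return _RISK.get(ext, "low_risk")
-- ===== Notes on version B (the rewrite author's own statement) =====
-- stated objective: idiomatic
-- what changed: Replaces the two any(endswith) suffix scans over 16 patterns with a single extraction of the extension after the last dot (rsplit) followed by one dict lookup.
import Mathlib
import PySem

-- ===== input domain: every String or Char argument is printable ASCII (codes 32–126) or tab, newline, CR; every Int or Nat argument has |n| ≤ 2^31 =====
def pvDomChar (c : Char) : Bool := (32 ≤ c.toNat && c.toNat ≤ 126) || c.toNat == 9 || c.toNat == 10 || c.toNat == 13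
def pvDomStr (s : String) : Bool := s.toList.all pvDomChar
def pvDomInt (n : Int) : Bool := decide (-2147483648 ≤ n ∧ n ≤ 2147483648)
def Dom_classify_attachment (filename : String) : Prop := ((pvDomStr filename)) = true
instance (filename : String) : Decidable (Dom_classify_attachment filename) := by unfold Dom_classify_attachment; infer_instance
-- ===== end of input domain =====

-- B replaces A's two any(endswith) suffix scans by extracting the extension after the
-- last dot once and doing a single table lookup (more idiomatic; equal return values).

-- ===== PORT A =====
def classify_attachment (filename : String) : String :=
  let lower := PySem.Chars.strip (PySem.Chars.lower ((if filename = "" then "" else filename).toList))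
  if lower = [] then "unknown"
  else
    let risky : List (List Char) :=
      [['.','e','x','e'], ['.','m','s','i'], ['.','b','a','t'], ['.','c','m','d'],
       ['.','s','c','r'], ['.','j','s'], ['.','v','b','s'], ['.','j','a','r'],
       ['.','p','s','1'], ['.','h','t','a'], ['.','i','s','o'], ['.','z','i','p'],
       ['.','r','a','r']]
    if risky.any (fun ext => PySem.Chars.endswith lower ext) then "high_risk"
    else if [['.','d','o','c','m'], ['.','x','l','s','m'], ['.','p','p','t','m']].any
        (fun ext => PySem.Chars.endswith lower ext) then "macro_risk"
    else "low_risk"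

-- ===== PORT B =====
def riskTable : PySem.Dict (List Char) String :=
  PySem.Dict.ofList
    [ (['.','e','x','e'], "high_risk"), (['.','m','s','i'], "high_risk"),
      (['.','b','a','t'], "high_risk"), (['.','c','m','d'], "high_risk"),
      (['.','s','c','r'], "high_risk"), (['.','j','s'], "high_risk"),
      (['.','v','b','s'], "high_risk"), (['.','j','a','r'], "high_risk"),
      (['.','p','s','1'], "high_risk"), (['.','h','t','a'], "high_risk"),
      (['.','i','s','o'], "high_risk"), (['.','z','i','p'], "high_risk"),
      (['.','r','a','r'], "high_risk"),
      (['.','d','o','c','m'], "macro_risk"), (['.','x','l','s','m'], "macro_risk"),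
      (['.','p','p','t','m'], "macro_risk") ]

def classify_attachment_alt (filename : String) : String :=
  let lower := PySem.Chars.strip (PySem.Chars.lower ((if filename = "" then "" else filename).toList))
  if lower = [] then "unknown"
  else
    let ext : List Char :=
      if PySem.Chars.isIn ['.'] lower then
        -- exact port of lower.rsplit('.', 1)[-1]: the segment of `lower` after its last '.'
        '.' :: (List.takeWhile (fun c => c != '.') lower.reverse).reverse
      else []
    PySem.Dict.getD riskTable ext "low_risk"

-- ===== PRECONDITION & SPEC =====
def Spec_classify_attachment (filename : String) (out : String) : Prop := out = classify_attachment_alt filename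
instance (filename : String) (out : String) : Decidable (Spec_classify_attachment filename out) := by unfold Spec_classify_attachment; infer_instance

-- ===== CLAIM (what is proved, stated in full; the proofs are below) =====
def Claim_equal_classify_attachment : Prop := ∀ (filename : String), Dom_classify_attachment filename → Spec_classify_attachment filename (classify_attachment filename)

-- ===== LEMMAS AND PROOFS =====

lemma takeWhile_no_dot (v rest : List Char) (hv : '.' ∉ v) :
    List.takeWhile (fun c => c != '.') (v ++ '.' :: rest) = v := by
  induction v with
  | nil => simp
  | cons a as ih =>
    have ha : a ≠ '.' := by rintro rfl; exact hv List.mem_cons_self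
    simp [ha, ih (fun h => hv (List.mem_cons_of_mem _ h))]

lemma ends_iff (l w : List Char) (hw : '.' ∉ w) :
    ('.' :: w) <:+ l ↔ ('.' ∈ l ∧ (List.takeWhile (fun c => c != '.') l.reverse).reverse = w) := by
  constructor
  · rintro ⟨t, rfl⟩
    refine ⟨List.mem_append_right _ List.mem_cons_self, ?_⟩
    have : (t ++ '.' :: w).reverse = w.reverse ++ '.' :: t.reverse := by
      simp [List.reverse_append]
    rw [this, takeWhile_no_dot _ _ (fun h => hw (List.mem_reverse.mp h)), List.reverse_reverse]
  · rintro ⟨hd, hseg⟩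
    have htw : List.takeWhile (fun c => c != '.') l.reverse = w.reverse := by
      rw [← hseg, List.reverse_reverse]
    have hdrop_ne : List.dropWhile (fun c => c != '.') l.reverse ≠ [] := by
      intro h0
      have := (List.dropWhile_eq_nil_iff).mp h0 '.' (List.mem_reverse.mpr hd)
      simp at this
    obtain ⟨a, t, ht⟩ := List.exists_cons_of_ne_nil hdrop_ne
    have ha : a = '.' := by
      have hhd := List.head_dropWhile_not (p := fun c => c != '.') (l := l.reverse) hdrop_ne
      have h2 : (List.dropWhile (fun c => c != '.') l.reverse).head hdrop_ne = a := by
        simp [ht]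
      rw [h2] at hhd
      simpa using hhd
    have hrev : l.reverse = w.reverse ++ '.' :: t := by
      conv_lhs => rw [← List.takeWhile_append_dropWhile (p := fun c => c != '.') (l := l.reverse)]
      rw [htw, ht, ha]
    refine ⟨t.reverse, ?_⟩
    have := congrArg List.reverse hrev
    simpa [List.reverse_append] using this.symm

lemma endswith_no_dot (l w : List Char) (hd : '.' ∉ l) :
    PySem.Chars.endswith l ('.' :: w) = false := by
  rw [← Bool.not_eq_true, PySem.Chars.endswith_iff]
  rintro ⟨t, rfl⟩
  exact hd (List.mem_append_right _ List.mem_cons_self)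

lemma endswith_eq_seg (l w : List Char) (hd : '.' ∈ l) (hw : '.' ∉ w) :
    PySem.Chars.endswith l ('.' :: w)
      = (w == (List.takeWhile (fun c => c != '.') l.reverse).reverse) := by
  by_cases h : (List.takeWhile (fun c => c != '.') l.reverse).reverse = w
  · rw [(PySem.Chars.endswith_iff _ _).mpr ((ends_iff l w hw).mpr ⟨hd, h⟩)]
    simp [h]
  · have hf : PySem.Chars.endswith l ('.' :: w) = false := by
      rw [← Bool.not_eq_true, PySem.Chars.endswith_iff]
      intro hs; exact h ((ends_iff l w hw).mp hs).2
    rw [hf]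
    exact (beq_eq_false_iff_ne.mpr (fun he => h he.symm)).symm

lemma isIn_dot_of_mem (l : List Char) (hd : '.' ∈ l) : PySem.Chars.isIn ['.'] l = true := by
  rw [PySem.Chars.isIn_iff_infix]
  obtain ⟨s, t, rfl⟩ := List.append_of_mem hd
  exact ⟨s, t, by simp⟩

lemma isIn_dot_of_not_mem (l : List Char) (hd : '.' ∉ l) : PySem.Chars.isIn ['.'] l = false := by
  rw [PySem.Chars.isIn_eq_false_iff]
  intro hinf
  exact hd (List.singleton_sublist.mp hinf.sublist)

lemma tbl_lookup (seg : List Char) :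
    PySem.Dict.getD riskTable ('.' :: seg) "low_risk" =
      if (['e','x','e'] == seg || (['m','s','i'] == seg || (['b','a','t'] == seg ||
          (['c','m','d'] == seg || (['s','c','r'] == seg || (['j','s'] == seg ||
          (['v','b','s'] == seg || (['j','a','r'] == seg || (['p','s','1'] == seg ||
          (['h','t','a'] == seg || (['i','s','o'] == seg || (['z','i','p'] == seg ||
          ['r','a','r'] == seg)))))))))))) then "high_risk"
      else if (['d','o','c','m'] == seg || (['x','l','s','m'] == seg || ['p','p','t','m'] == seg))
        then "macro_risk"
      else "low_risk" := by
  have htbl : riskTable = PySem.Dict.mk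
    [ (['.','e','x','e'], "high_risk"), (['.','m','s','i'], "high_risk"),
      (['.','b','a','t'], "high_risk"), (['.','c','m','d'], "high_risk"),
      (['.','s','c','r'], "high_risk"), (['.','j','s'], "high_risk"),
      (['.','v','b','s'], "high_risk"), (['.','j','a','r'], "high_risk"),
      (['.','p','s','1'], "high_risk"), (['.','h','t','a'], "high_risk"),
      (['.','i','s','o'], "high_risk"), (['.','z','i','p'], "high_risk"),
      (['.','r','a','r'], "high_risk"),
      (['.','d','o','c','m'], "macro_risk"), (['.','x','l','s','m'], "macro_risk"),
      (['.','p','p','t','m'], "macro_risk") ] := by decide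
  rw [htbl]
  simp only [PySem.Dict.getD, PySem.Dict.get?_mk_cons, List.cons_beq_cons, beq_self_eq_true,
    Bool.true_and]
  by_cases h1 : (['e','x','e'] == seg) = true
  · simp_all
  by_cases h2 : (['m','s','i'] == seg) = true
  · simp_all
  by_cases h3 : (['b','a','t'] == seg) = true
  · simp_all
  by_cases h4 : (['c','m','d'] == seg) = true
  · simp_all
  by_cases h5 : (['s','c','r'] == seg) = true
  · simp_all
  by_cases h6 : (['j','s'] == seg) = true
  · simp_all
  by_cases h7 : (['v','b','s'] == seg) = true
  · simp_all
  by_cases h8 : (['j','a','r'] == seg) = true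
  · simp_all
  by_cases h9 : (['p','s','1'] == seg) = true
  · simp_all
  by_cases h10 : (['h','t','a'] == seg) = true
  · simp_all
  by_cases h11 : (['i','s','o'] == seg) = true
  · simp_all
  by_cases h12 : (['z','i','p'] == seg) = true
  · simp_all
  by_cases h13 : (['r','a','r'] == seg) = true
  · simp_all
  by_cases h14 : (['d','o','c','m'] == seg) = true
  · simp_all
  by_cases h15 : (['x','l','s','m'] == seg) = true
  · simp_all
  by_cases h16 : (['p','p','t','m'] == seg) = true
  · simp_all
  simp_all [PySem.Dict.get?]

-- ===== VERDICT (by name: the statement is the Claim_ definition above) =====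
theorem classify_attachment_spec : Claim_equal_classify_attachment := by
  intro filename _
  unfold Spec_classify_attachment classify_attachment classify_attachment_alt
  set l := PySem.Chars.strip (PySem.Chars.lower ((if filename = "" then "" else filename).toList)) with hl
  by_cases h0 : l = []
  · simp_all
  · simp only [if_neg h0]
    by_cases hd : '.' ∈ l
    · rw [isIn_dot_of_mem l hd]
      simp only [List.any_cons, List.any_nil, Bool.or_false, if_true]
      rw [endswith_eq_seg l ['e','x','e'] hd (by decide),
          endswith_eq_seg l ['m','s','i'] hd (by decide),
          endswith_eq_seg l ['b','a','t'] hd (by decide),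
          endswith_eq_seg l ['c','m','d'] hd (by decide),
          endswith_eq_seg l ['s','c','r'] hd (by decide),
          endswith_eq_seg l ['j','s'] hd (by decide),
          endswith_eq_seg l ['v','b','s'] hd (by decide),
          endswith_eq_seg l ['j','a','r'] hd (by decide),
          endswith_eq_seg l ['p','s','1'] hd (by decide),
          endswith_eq_seg l ['h','t','a'] hd (by decide),
          endswith_eq_seg l ['i','s','o'] hd (by decide),
          endswith_eq_seg l ['z','i','p'] hd (by decide),
          endswith_eq_seg l ['r','a','r'] hd (by decide),
          endswith_eq_seg l ['d','o','c','m'] hd (by decide),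
          endswith_eq_seg l ['x','l','s','m'] hd (by decide),
          endswith_eq_seg l ['p','p','t','m'] hd (by decide),
          tbl_lookup]
    · rw [isIn_dot_of_not_mem l hd]
      simp only [List.any_cons, List.any_nil, Bool.or_false,
        endswith_no_dot l _ hd, Bool.false_eq_true, if_false]
      decide
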